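-- pv_equiv track=rewrite | github.com/yashbelhe/ASD | compiler/shader_transformer_tree_sitter.py | preprocess_source
-- ===== SOURCE A (Python) =====
-- def preprocess_source(source_code, keep_disc_attributes=False):
--     """Add // before any line that starts with [ (ignoring whitespace).
--     If keep_disc_attributes is True, do not comment out [Disc] so it remains in the output.
--     """
--     lines = source_code.split('\n')
--     processed_lines = []
--
--     for line in lines:
--         stripped = line.lstrip()
--         if stripped.startswith('['):
--             if keep_disc_attributes and stripped.startswith('[Disc]'):
--                 processed_lines.append(line)
--                 continue
--             indent = line[:len(line) - len(stripped)]
--             processed_lines.append(f"{indent}//{stripped}")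
--         else:
--             processed_lines.append(line)
--
--     return '\n'.join(processed_lines)
-- ===== SOURCE B (Python) =====
-- def preprocess_source(source_code, keep_disc_attributes=False):
--     """Single forward scan over the whole string: no split/lstrip, the line
--     boundaries are located with find and pieces are emitted directly."""
--     out = []
--     i, n = 0, len(source_code)
--     while True:
--         j = source_code.find('\n', i)
--         if j == -1:
--             j = n
--         k = i
--         while k < j and source_code[k] in ' \t\r\x0b\x0c':
--             k += 1
--         if k < j and source_code[k] == '[' and not (
--                 keep_disc_attributes and source_code.startswith('[Disc]', k)):
--             out.append(source_code[i:k])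
--             out.append('//')
--             out.append(source_code[k:j])
--         else:
--             out.append(source_code[i:j])
--         if j == n:
--             break
--         out.append('\n')
--         i = j + 1
--     return ''.join(out)
-- ===== Notes on version B (the rewrite author's own statement) =====
-- stated objective: alternative
-- what changed: B replaces A's split-into-lines / lstrip / f-string / join pipeline by a single forward index scan over the whole string: it locates each newline with str.find, skips the indentation with an explicit index loop, and emits the output pieces directly, never materialising a list of lines.
import Mathlib
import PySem

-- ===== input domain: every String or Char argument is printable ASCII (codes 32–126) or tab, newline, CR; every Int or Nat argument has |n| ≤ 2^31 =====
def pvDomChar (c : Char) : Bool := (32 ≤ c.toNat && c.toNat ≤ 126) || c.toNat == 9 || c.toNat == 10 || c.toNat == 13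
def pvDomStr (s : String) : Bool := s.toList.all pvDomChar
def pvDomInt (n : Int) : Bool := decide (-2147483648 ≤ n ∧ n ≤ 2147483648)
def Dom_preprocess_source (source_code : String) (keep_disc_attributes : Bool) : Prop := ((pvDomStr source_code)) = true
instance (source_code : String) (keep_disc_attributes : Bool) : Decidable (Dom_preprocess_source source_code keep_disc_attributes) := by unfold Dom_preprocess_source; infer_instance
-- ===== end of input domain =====

-- B replaces A's split/lstrip/join pipeline by a single forward scan over the whole
-- string (find the next newline, classify the line in place, emit pieces); objective: alternative.


-- ===== PORT A =====
-- per-line body of A's for-loop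
def pvLineA (keep : Bool) (line : List Char) : List Char :=
  let stripped := PySem.Chars.lstrip line
  if PySem.Chars.startswith stripped ['['] then
    if keep && PySem.Chars.startswith stripped ['[', 'D', 'i', 's', 'c', ']'] then line
    else
      let indent := PySem.List.slice line none (some ((line.length : Int) - (stripped.length : Int)))
      indent ++ ['/', '/'] ++ stripped
  else line

def preprocess_source (source_code : String) (keep_disc_attributes : Bool) : String :=
  String.ofList (PySem.Chars.join ['\n']
    ((PySem.Chars.splitOn source_code.toList ['\n']).foldl
      (fun acc line => acc ++ [pvLineA keep_disc_attributes line]) []))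

-- ===== PORT B =====
-- port of B's inner membership test `c in ' \t\r\x0b\x0c'`
def pvWsB (c : Char) : Bool := c ∈ [' ', '\t', '\r', '\x0b', '\x0c']

-- port of B's while-loop over `i`, one step per line on the remaining suffix;
-- `j = source_code.find('\n', i)` is the index of the first '\n' (length if absent).
def pvProcB (keep : Bool) (cs : List Char) : List Char :=
  let j := cs.findIdx (· == '\n')
  let line := cs.take j
  let ws := line.takeWhile pvWsB          -- the inner `while k < j and … in …` scan
  let rest := line.drop ws.length
  let piece :=
    if rest.head? == some '[' &&
        !(keep && PySem.Chars.startswith rest ['[', 'D', 'i', 's', 'c', ']']) then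
      ws ++ ['/', '/'] ++ rest
    else line
  if _h : j < cs.length then piece ++ '\n' :: pvProcB keep (cs.drop (j + 1))
  else piece
termination_by cs.length
decreasing_by simp; omega

def preprocess_source_alt (source_code : String) (keep_disc_attributes : Bool) : String :=
  String.ofList (pvProcB keep_disc_attributes source_code.toList)

-- ===== PRECONDITION & SPEC =====
def Spec_preprocess_source (source_code : String) (keep_disc_attributes : Bool) (out : String) : Prop := out = preprocess_source_alt source_code keep_disc_attributes
instance (source_code : String) (keep_disc_attributes : Bool) (out : String) : Decidable (Spec_preprocess_source source_code keep_disc_attributes out) := by unfold Spec_preprocess_source; infer_instance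

-- ===== CLAIM (what is proved, stated in full; the proofs are below) =====
def Claim_equal_preprocess_source : Prop := ∀ (source_code : String) (keep_disc_attributes : Bool), Dom_preprocess_source source_code keep_disc_attributes → Spec_preprocess_source source_code keep_disc_attributes (preprocess_source source_code keep_disc_attributes)

-- ===== LEMMAS AND PROOFS =====

lemma char_eq_iff (a b : Char) : a = b ↔ a.toNat = b.toNat :=
  ⟨fun h => by rw [h], fun h => by rw [← Char.ofNat_toNat a, ← Char.ofNat_toNat b, h]⟩

-- structural model of `splitOn cs ['\n']`
def pvSplitNl : List Char → List (List Char)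
  | [] => [[]]
  | c :: rest =>
    if c = '\n' then [] :: pvSplitNl rest
    else
      match pvSplitNl rest with
      | [] => [[c]]
      | p :: ps => (c :: p) :: ps

lemma pvSplitNl_ne_nil (cs : List Char) : pvSplitNl cs ≠ [] := by
  cases cs with
  | nil => simp [pvSplitNl]
  | cons c rest =>
    simp only [pvSplitNl]
    split
    · simp
    · split <;> simp

lemma pvSplitNl_go (fuel : Nat) (l cur : List Char) (acc : List (List Char)) (hf : l.length < fuel) :
    PySem.Chars.splitOn.go ['\n'] fuel l cur acc
      = acc.reverse ++ (pvSplitNl l).modifyHead (cur.reverse ++ ·) := by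
  induction fuel generalizing l cur acc with
  | zero => omega
  | succ fuel ih =>
    cases l with
    | nil => rw [PySem.Chars.splitOn.go.eq_def]; simp [pvSplitNl]
    | cons c rest =>
      rw [PySem.Chars.splitOn.go.eq_def]
      simp only []
      by_cases hc : c = '\n'
      · subst hc
        rw [show (['\n'].isPrefixOf ('\n' :: rest)) = true by simp [List.isPrefixOf]]
        simp only [if_true]
        rw [show List.drop (['\n'].length) ('\n' :: rest) = rest from rfl]
        rw [ih rest [] (cur.reverse :: acc) (by simp at hf ⊢; omega)]
        simp only [pvSplitNl, if_pos rfl]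
        cases pvSplitNl rest <;> simp
      · rw [show (['\n'].isPrefixOf (c :: rest)) = false by
          simp [List.isPrefixOf]; exact fun h => hc h.symm]
        simp only [Bool.false_eq_true, if_false]
        rw [ih rest (c :: cur) acc (by simp at hf ⊢; omega)]
        have hne := pvSplitNl_ne_nil rest
        cases hps : pvSplitNl rest with
        | nil => exact absurd hps hne
        | cons p ps => simp [pvSplitNl, hc, hps]

lemma splitOn_nl (cs : List Char) :
    PySem.Chars.splitOn cs ['\n'] = pvSplitNl cs := by
  unfold PySem.Chars.splitOn
  rw [pvSplitNl_go (cs.length + 1) cs [] [] (by omega)]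
  cases hps : pvSplitNl cs with
  | nil => exact absurd hps (pvSplitNl_ne_nil cs)
  | cons p ps => simp

lemma take_findIdx_eq_takeWhile (p : Char → Bool) (l : List Char) :
    l.take (l.findIdx p) = l.takeWhile (fun c => !p c) := by
  induction l with
  | nil => simp
  | cons c rest ih =>
    by_cases hc : p c
    · simp [List.findIdx_cons, hc]
    · simp [List.findIdx_cons, hc, ih]

lemma pvSplitNl_step (cs : List Char) (h : cs.findIdx (· == '\n') < cs.length) :
    pvSplitNl cs =
      cs.take (cs.findIdx (· == '\n')) :: pvSplitNl (cs.drop (cs.findIdx (· == '\n') + 1)) := by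
  induction cs with
  | nil => simp at h
  | cons c rest ih =>
    by_cases hc : c = '\n'
    · subst hc
      simp [pvSplitNl, List.findIdx_cons]
    · have hb : (c == '\n') = false := by simp [hc]
      have hfi : (c :: rest).findIdx (· == '\n') = rest.findIdx (· == '\n') + 1 := by
        simp [List.findIdx_cons, hb]
      rw [hfi] at h ⊢
      have hlt : rest.findIdx (· == '\n') < rest.length := by simpa using h
      simp only [pvSplitNl, if_neg hc, ih hlt, List.take_succ_cons, List.drop_succ_cons]

lemma pvSplitNl_last (cs : List Char) (h : ¬ cs.findIdx (· == '\n') < cs.length) :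
    pvSplitNl cs = [cs] := by
  induction cs with
  | nil => simp [pvSplitNl]
  | cons c rest ih =>
    by_cases hc : c = '\n'
    · subst hc
      simp [List.findIdx_cons] at h
    · have hb : (c == '\n') = false := by simp [hc]
      have hfi : (c :: rest).findIdx (· == '\n') = rest.findIdx (· == '\n') + 1 := by
        simp [List.findIdx_cons, hb]
      rw [hfi] at h
      have hge : ¬ rest.findIdx (· == '\n') < rest.length := by simp at h ⊢; omega
      simp only [pvSplitNl, if_neg hc, ih hge]

-- on domain characters other than '\n', Python's str.isspace agrees with B's char set
lemma isspace_eq_pvWsB {c : Char} (hd : pvDomChar c = true) (hnl : c ≠ '\n') :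
    PySem.Chars.isspace c = pvWsB c := by
  have h10 : c.toNat ≠ 10 := fun h => hnl ((char_eq_iff c '\n').mpr h)
  simp only [pvDomChar, Bool.or_eq_true, Bool.and_eq_true, decide_eq_true_eq, beq_iff_eq] at hd
  simp only [PySem.Chars.isspace, pvWsB, List.mem_cons, List.not_mem_nil, or_false, char_eq_iff]
  simp only [show ('\t').toNat = 9 from rfl, show ('\r').toNat = 13 from rfl,
    show (' ').toNat = 32 from rfl, show ('\x0b').toNat = 11 from rfl,
    show ('\x0c').toNat = 12 from rfl]
  rw [Bool.eq_iff_iff]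
  simp only [Bool.or_eq_true, Bool.and_eq_true, decide_eq_true_eq]
  omega

lemma dropWhile_congr_chars (p q : Char → Bool) (l : List Char) (h : ∀ x ∈ l, p x = q x) :
    l.dropWhile p = l.dropWhile q := by
  induction l with
  | nil => simp
  | cons c rest ih =>
    have hc := h c (by simp)
    by_cases hp : p c
    · simp [List.dropWhile_cons, hp, hc ▸ hp, ih (fun x hx => h x (by simp [hx]))]
    · simp [List.dropWhile_cons, hp, hc ▸ hp]

lemma drop_length_takeWhile (p : Char → Bool) (l : List Char) :
    l.drop ((l.takeWhile p).length) = l.dropWhile p := by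
  induction l with
  | nil => simp
  | cons c rest ih => by_cases h : p c <;> simp [List.takeWhile_cons, h, ih]

lemma take_length_takeWhile (p : Char → Bool) (l : List Char) :
    l.take ((l.takeWhile p).length) = l.takeWhile p := by
  induction l with
  | nil => simp
  | cons c rest ih => by_cases h : p c <;> simp [List.takeWhile_cons, h, ih]

lemma startswith_bracket (s : List Char) :
    PySem.Chars.startswith s ['['] = (s.head? == some '[') := by
  cases s with
  | nil => simp [PySem.Chars.startswith, List.isPrefixOf]
  | cons c rest =>
    by_cases h : c = '['
    · subst h; rfl
    · have h1 : ('[' == c) = false := by simp [Ne.symm h]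
      have h2 : (c == '[') = false := by simp [h]
      simp [PySem.Chars.startswith, List.isPrefixOf, h1, h2]

-- per-line agreement of A's body with B's in-place classification
lemma line_eq (keep : Bool) (line : List Char)
    (hd : ∀ c ∈ line, pvDomChar c = true) (hnl : '\n' ∉ line) :
    pvLineA keep line =
      (let ws := line.takeWhile pvWsB
       let rest := line.drop ws.length
       if rest.head? == some '[' &&
           !(keep && PySem.Chars.startswith rest ['[', 'D', 'i', 's', 'c', ']']) then
         ws ++ ['/', '/'] ++ rest
       else line) := by
  have hstripped : PySem.Chars.lstrip line = line.drop ((line.takeWhile pvWsB).length) := by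
    rw [drop_length_takeWhile]
    exact dropWhile_congr_chars _ _ line
      (fun x hx => isspace_eq_pvWsB (hd x hx) (fun h => hnl (h ▸ hx)))
  have hws : (line.takeWhile pvWsB).length ≤ line.length := by
    exact (List.takeWhile_prefix pvWsB).length_le
  have hindent :
      PySem.List.slice line none
          (some ((line.length : Int) - ((line.length - (line.takeWhile pvWsB).length : Nat) : Int)))
        = line.takeWhile pvWsB := by
    have h1 : ((line.length : Int) - ((line.length - (line.takeWhile pvWsB).length : Nat) : Int))
        = ((line.takeWhile pvWsB).length : Int) := by
      push_cast [Nat.cast_sub hws]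
      ring
    rw [h1, PySem.List.slice_to line (by positivity)]
    rw [Int.toNat_natCast, take_length_takeWhile]
  show (if PySem.Chars.startswith (PySem.Chars.lstrip line) ['['] = true then _ else _) = _
  rw [hstripped, startswith_bracket]
  by_cases hbr : (line.drop ((line.takeWhile pvWsB).length)).head? = some '['
  · simp only [hbr, beq_self_eq_true, if_true, Bool.true_and]
    by_cases hdisc : (keep &&
        PySem.Chars.startswith (line.drop ((line.takeWhile pvWsB).length))
          ['[', 'D', 'i', 's', 'c', ']']) = true
    · simp [hdisc, hstripped]
    · simp only [Bool.not_eq_true] at hdisc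
      simp [hdisc, hstripped, hindent]
  · have hfalse : ((line.drop ((line.takeWhile pvWsB).length)).head? == some '[') = false := by
      simp only [beq_eq_false_iff_ne, ne_eq]
      exact hbr
    simp only [hfalse, Bool.false_and, Bool.false_eq_true, if_false]

-- Dom is preserved by drop
lemma dom_drop {cs : List Char} (hd : ∀ c ∈ cs, pvDomChar c = true) (k : Nat) :
    ∀ c ∈ cs.drop k, pvDomChar c = true :=
  fun c hc => hd c (List.mem_of_mem_drop hc)

-- no newline occurs in the current line
lemma nl_not_mem_take (cs : List Char) :
    '\n' ∉ cs.take (cs.findIdx (· == '\n')) := by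
  rw [take_findIdx_eq_takeWhile]
  intro hmem
  have := List.mem_takeWhile_imp hmem
  simp at this

-- the main loop equivalence
lemma main_lemma (keep : Bool) :
    ∀ (n : Nat) (cs : List Char), cs.length ≤ n → (∀ c ∈ cs, pvDomChar c = true) →
      pvProcB keep cs
        = PySem.Chars.join ['\n'] ((pvSplitNl cs).map (pvLineA keep)) := by
  intro n
  induction n with
  | zero =>
    intro cs hlen _
    have : cs = [] := List.eq_nil_of_length_eq_zero (Nat.le_zero.mp hlen)
    subst this
    rw [pvProcB]
    simp [pvSplitNl, PySem.Chars.join_singleton, pvLineA, PySem.Chars.lstrip,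
      PySem.Chars.startswith, List.isPrefixOf]
  | succ n ih =>
    intro cs hlen hd
    rw [pvProcB]
    by_cases hj : cs.findIdx (· == '\n') < cs.length
    · rw [dif_pos hj, pvSplitNl_step cs hj]
      have hjd : cs.findIdx (· == '\n') + 1 ≤ cs.length := hj
      have hlen' : (cs.drop (cs.findIdx (· == '\n') + 1)).length ≤ n := by
        rw [List.length_drop]; omega
      rw [List.map_cons]
      have hne : (pvSplitNl (cs.drop (cs.findIdx (· == '\n') + 1))).map (pvLineA keep) ≠ [] := by
        simp [pvSplitNl_ne_nil]
      cases hps : (pvSplitNl (cs.drop (cs.findIdx (· == '\n') + 1))).map (pvLineA keep) with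
      | nil => exact absurd hps hne
      | cons q qs =>
        rw [PySem.Chars.join_cons_cons]
        rw [ih (cs.drop (cs.findIdx (· == '\n') + 1)) hlen' (dom_drop hd _), hps]
        rw [line_eq keep (cs.take (cs.findIdx (· == '\n')))
          (fun c hc => hd c (List.mem_of_mem_take hc)) (nl_not_mem_take cs)]
        simp
    · rw [dif_neg hj, pvSplitNl_last cs hj]
      have htake : cs.take (cs.findIdx (· == '\n')) = cs := by
        apply List.take_of_length_le
        omega
      have hnl : '\n' ∉ cs := by
        rw [← htake]; exact nl_not_mem_take cs
      rw [List.map_singleton, PySem.Chars.join_singleton]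
      rw [line_eq keep cs hd hnl, htake]

-- ===== VERDICT (by name: the statement is the Claim_ definition above) =====
theorem preprocess_source_spec : Claim_equal_preprocess_source := by
  intro s keep hdom
  unfold Spec_preprocess_source preprocess_source preprocess_source_alt
  have hd : ∀ c ∈ s.toList, pvDomChar c = true := fun c hc => List.all_eq_true.mp hdom c hc
  rw [PySem.List.foldl_append_singleton_eq_map, List.nil_append, splitOn_nl,
    main_lemma keep s.toList.length s.toList le_rfl hd]
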